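-- pv_equiv track=rewrite | github.com/INF1007-2020A/c04-ch5-exercices-JamZel | exercice.py | verify_ages
-- ===== SOURCE A (Python) =====
-- from typing import List
--
-- def verify_ages(groups: List[List[int]]) -> List[bool]:
--     accept = []
--     for i in groups:
--         verdict = True
--
--         if len(i) <= 3 or len(i) > 10:
--             verdict = False
--
--         elif 25 in i and verdict:
--             accept.append(True)
--             continue
--
--         for j in i:
--             if j < 18 or (50 in i and j > 70):
--                 verdict = False
--                 break
--
--         accept.append(verdict)
--
--     return accept
-- ===== SOURCE B (Python) =====
-- from typing import List
--
-- def verify_ages(groups: List[List[int]]) -> List[bool]: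
--     result = []
--     for g in groups:
--         if len(g) <= 3 or len(g) > 10:
--             result.append(False)
--         elif 25 in g:
--             result.append(True)
--         else:
--             result.append(min(g) >= 18 and (50 not in g or max(g) <= 70))
--     return result
-- ===== Notes on version B (the rewrite author's own statement) =====
-- stated objective: simpler
-- what changed: Replaces A's inner element-by-element scan with a running flag and early break by per-group aggregate queries (min/max and membership): a group is accepted iff its length is valid and it contains 25, or min(g) >= 18 and (50 not in g or max(g) <= 70).
import Mathlib
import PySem

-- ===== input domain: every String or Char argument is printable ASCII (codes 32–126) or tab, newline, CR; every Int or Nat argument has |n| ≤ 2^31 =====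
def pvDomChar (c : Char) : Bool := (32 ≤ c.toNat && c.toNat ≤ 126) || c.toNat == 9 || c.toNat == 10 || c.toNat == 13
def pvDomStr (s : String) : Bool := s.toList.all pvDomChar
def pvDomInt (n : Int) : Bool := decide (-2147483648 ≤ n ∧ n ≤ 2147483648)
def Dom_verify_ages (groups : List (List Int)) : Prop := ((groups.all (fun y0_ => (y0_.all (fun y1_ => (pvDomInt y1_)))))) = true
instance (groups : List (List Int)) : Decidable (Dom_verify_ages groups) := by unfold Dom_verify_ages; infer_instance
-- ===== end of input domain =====

-- B replaces A's inner scan-with-break over a running flag by per-group aggregate queries (min/max, membership); same results, simpler.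

-- ===== PORT A =====
-- inner loop: 'for j in i: if j < 18 or (50 in i and j > 70): verdict = False; break'
def pvInnerA (group : List Int) : List Int → Bool → Bool
  | [], v => v
  | j :: rest, v =>
      if decide (j < 18) || (decide (50 ∈ group) && decide (70 < j)) then false
      else pvInnerA group rest v

def verify_ages (groups : List (List Int)) : List Bool :=
  groups.foldl (fun accept i =>
    if decide (i.length ≤ 3) || decide (10 < i.length) then
      accept ++ [pvInnerA i i false]          -- verdict = False, then the inner loop still runs
    else if decide (25 ∈ i) then
      accept ++ [true]                        -- append(True); continue
    else
      accept ++ [pvInnerA i i true]) []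

-- ===== PORT B =====
def pvGroupB (g : List Int) : Bool :=
  if decide (g.length ≤ 3) || decide (10 < g.length) then false
  else if decide (25 ∈ g) then true
  else
    match PySem.List.min? g (id : Int → Int), PySem.List.max? g (id : Int → Int) with
    | some m, some M => decide (18 ≤ m) && (!decide (50 ∈ g) || decide (M ≤ 70))
    | _, _ => false    -- unreachable: the valid length guarantees g ≠ []

def verify_ages_alt (groups : List (List Int)) : List Bool :=
  groups.map pvGroupB

-- ===== PRECONDITION & SPEC =====
def Spec_verify_ages (groups : List (List Int)) (out : List Bool) : Prop := out = verify_ages_alt groups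
instance (groups : List (List Int)) (out : List Bool) : Decidable (Spec_verify_ages groups out) := by unfold Spec_verify_ages; infer_instance

-- ===== CLAIM (what is proved, stated in full; the proofs are below) =====
def Claim_equal_verify_ages : Prop := ∀ (groups : List (List Int)), Dom_verify_ages groups → Spec_verify_ages groups (verify_ages groups)

-- ===== LEMMAS AND PROOFS =====

theorem pvInnerA_false (group l : List Int) : pvInnerA group l false = false := by
  induction l with
  | nil => rfl
  | cons j rest ih => simp only [pvInnerA]; split <;> simp [ih]

theorem pvInnerA_all (group l : List Int) :
    pvInnerA group l true
      = l.all (fun j => !(decide (j < 18) || (decide (50 ∈ group) && decide (70 < j)))) := by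
  induction l with
  | nil => rfl
  | cons j rest ih =>
    simp only [pvInnerA, List.all_cons]
    split
    · rename_i h
      simp only [h, Bool.not_true, Bool.false_and]
    · rename_i h
      have hcf : (decide (j < 18) || (decide (50 ∈ group) && decide (70 < j))) = false := by
        simpa using h
      simp only [hcf, Bool.not_false, Bool.true_and, ih]

theorem pvGroup_eq (g : List Int) :
    (if decide (g.length ≤ 3) || decide (10 < g.length) then pvInnerA g g false
     else if decide (25 ∈ g) then true
     else pvInnerA g g true) = pvGroupB g := by
  unfold pvGroupB
  by_cases hlen : (decide (g.length ≤ 3) || decide (10 < g.length)) = true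
  · rw [if_pos hlen, if_pos hlen, pvInnerA_false]
  · rw [if_neg hlen, if_neg hlen]
    by_cases h25 : (decide (25 ∈ g)) = true
    · rw [if_pos h25, if_pos h25]
    · rw [if_neg h25, if_neg h25]
      have hne : g ≠ [] := by
        intro h; subst h; simp at hlen
      obtain ⟨m, hm⟩ : ∃ m, PySem.List.min? g (id : Int → Int) = some m := by
        cases hmin : PySem.List.min? g (id : Int → Int) with
        | none => exact absurd ((PySem.List.min?_eq_none_iff g id).mp hmin) hne
        | some m => exact ⟨m, rfl⟩
      obtain ⟨M, hM⟩ : ∃ M, PySem.List.max? g (id : Int → Int) = some M := by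
        cases hmax : PySem.List.max? g (id : Int → Int) with
        | none => exact absurd ((PySem.List.max?_eq_none_iff g id).mp hmax) hne
        | some M => exact ⟨M, rfl⟩
      rw [pvInnerA_all, hm, hM]
      have hmMem : m ∈ g := PySem.List.min?_mem hm
      have hmMin : ∀ y ∈ g, m ≤ y := fun y hy => PySem.List.min?_isMin hm y hy
      have hMMem : M ∈ g := PySem.List.max?_mem hM
      have hMMax : ∀ y ∈ g, y ≤ M := fun y hy => PySem.List.max?_isMax hM y hy
      rw [Bool.eq_iff_iff]
      simp only [List.all_eq_true, Bool.not_eq_true', Bool.or_eq_false_iff,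
        Bool.and_eq_false_iff, decide_eq_false_iff_not, not_lt, Bool.and_eq_true,
        Bool.or_eq_true, Bool.not_eq_true', decide_eq_true_eq]
      constructor
      · intro h
        refine ⟨(h m hmMem).1, ?_⟩
        rcases (h M hMMem).2 with h50 | hle
        · exact Or.inl (by simpa using h50)
        · exact Or.inr hle
      · rintro ⟨h1, h2⟩ j hj
        refine ⟨le_trans h1 (hmMin j hj), ?_⟩
        rcases h2 with h50 | hle
        · exact Or.inl (by simpa using h50)
        · exact Or.inr (le_trans (hMMax j hj) hle)

theorem verify_ages_fold (groups : List (List Int)) (acc : List Bool) :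
    groups.foldl (fun accept i =>
      if decide (i.length ≤ 3) || decide (10 < i.length) then accept ++ [pvInnerA i i false]
      else if decide (25 ∈ i) then accept ++ [true]
      else accept ++ [pvInnerA i i true]) acc = acc ++ groups.map pvGroupB := by
  induction groups generalizing acc with
  | nil => simp
  | cons g rest ih =>
    simp only [List.foldl_cons, List.map_cons]
    have hg := pvGroup_eq g
    split
    · rename_i h
      rw [if_pos h] at hg
      rw [ih, hg]
      simp
    · rename_i h
      split
      · rename_i h2
        rw [if_neg h, if_pos h2] at hg
        rw [ih, hg]
        simp
      · rename_i h2
        rw [if_neg h, if_neg h2] at hg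
        rw [ih, hg]
        simp

-- ===== VERDICT (by name: the statement is the Claim_ definition above) =====
theorem verify_ages_spec : Claim_equal_verify_ages := by
  intro groups _
  unfold Spec_verify_ages verify_ages verify_ages_alt
  simpa using verify_ages_fold groups []
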